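-- pv_equiv track=rewrite | github.com/Kyuber1007/problemsolving | programmers/자동완성.py | solution
-- ===== SOURCE A (Python) =====
-- def solution(words):
--     # 각 단어를 입력해야하는 갯수를 구하기 위한 배열 설정
--     answer = [0] * len(words)
--     words.sort()
--
--     for i in range(len(words) - 1):
--         tem1 = words[i]
--         tem2 = words[i+1]
--         len1 = len(tem1)
--         len2 = len(tem2)
--
--         # 앞 뒤를 비교해가면서 입력되어야 하는 것들 비교
--         for j in range(min(len1, len2)):
--             if tem1[j] != tem2[j]:
--                 # 같은 index까지만 출력하도록 설정
--                 j -= 1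
--                 break
--         # 정답을 구할 때, 같은 갯수보다 1개 더 크게 입력해야하므로 아래와 같이 구함
--         answer[i] = max(answer[i], min(len1, j + 2))
--         answer[i+1] = max(answer[i+1], min(len2, j + 2))
--     return sum(answer)
-- ===== SOURCE B (Python) =====
-- def solution(words):
--     # Count every nonempty prefix of every word with a hash map, then each
--     # word's cost is the first prefix length whose count drops to 1 (capped
--     # at the word's length). No sorting; does not mutate `words`.
--     cnt = {}
--     for w in words:
--         for i in range(1, len(w) + 1):
--             p = w[:i]
--             cnt[p] = cnt.get(p, 0) + 1
--     total = 0
--     for w in words: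
--         d = 0
--         for i in range(1, len(w) + 1):
--             d = i
--             if cnt[w[:i]] == 1:
--                 break
--         total += d
--     return total
-- ===== Notes on version B (the rewrite author's own statement) =====
-- stated objective: alternative
-- what changed: Replaces sort-then-compare-adjacent-neighbours with an unsorted prefix-count hash map (trie flattened to a dict): each word's cost is the first prefix length whose global count is 1, capped at its length.
-- intended difference: On a single-element list with a nonempty word A returns 0 (its pairwise loop never runs), while B returns 1, the intended cost of typing one character before autocomplete finishes the unique word. — e.g. on solution(["a"]): A returns 0, B returns 1
import Mathlib
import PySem

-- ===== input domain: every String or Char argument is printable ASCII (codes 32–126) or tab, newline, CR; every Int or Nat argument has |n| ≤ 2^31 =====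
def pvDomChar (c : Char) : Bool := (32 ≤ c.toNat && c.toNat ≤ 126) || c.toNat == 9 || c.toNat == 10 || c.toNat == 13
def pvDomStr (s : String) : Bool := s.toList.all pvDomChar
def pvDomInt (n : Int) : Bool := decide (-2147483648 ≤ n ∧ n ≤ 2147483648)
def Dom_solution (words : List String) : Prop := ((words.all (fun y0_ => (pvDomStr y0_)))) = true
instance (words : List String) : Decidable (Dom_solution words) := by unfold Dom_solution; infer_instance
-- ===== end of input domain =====

-- B replaces A's sort + adjacent-pair comparison with an unsorted prefix-count hash map; equal return
-- values are proved on Pre_ outside D_ (note: Python A sorts `words` in place, B does not mutate it —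
-- the equivalence here is about the return value only).

-- ===== PORT A =====
-- inner loop 'for j in range(m): if tem1[j] != tem2[j]: j -= 1; break' and the value of j used after it.
-- When m = 0 Python leaves j unbound (later UnboundLocalError, outside Pre_); the port returns -1 there.
def solInner (t1 t2 : String) (m j : Nat) : Int :=
  if _h : j < m then
    if PySem.Str.pyGet? t1 (j : Int) ≠ PySem.Str.pyGet? t2 (j : Int) then (j : Int) - 1
    else solInner t1 t2 m (j + 1)
  else (m : Int) - 1
termination_by m - j

-- one iteration of the outer 'for i in range(len(words) - 1)' loop, updating the answer array
def solStep (ws : List String) (answer : List Int) (i : Int) : List Int :=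
  let tem1 := PySem.List.pyGetD ws i ""
  let tem2 := PySem.List.pyGetD ws (i + 1) ""
  let len1 := PySem.Str.len tem1
  let len2 := PySem.Str.len tem2
  let j := solInner tem1 tem2 (min len1 len2).toNat 0
  let a1 := PySem.List.pySetD answer i (max (PySem.List.pyGetD answer i 0) (min len1 (j + 2)))
  PySem.List.pySetD a1 (i + 1) (max (PySem.List.pyGetD a1 (i + 1) 0) (min len2 (j + 2)))

def solution (words : List String) : Int :=
  let answer : List Int := List.replicate words.length 0
  let ws := PySem.List.sorted words (fun x => x) false
  ((PySem.List.pyRange 0 (PySem.List.len ws - 1) 1).foldl (solStep ws) answer).sum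

-- ===== PORT B =====
-- 'for w in words: for i in range(1, len(w)+1): p = w[:i]; cnt[p] = cnt.get(p, 0) + 1'
-- (string slices w[:i] are carried as their character lists, exact for every string)
def altCount (words : List String) : PySem.Dict (List Char) Int :=
  words.foldl (fun cnt w =>
    (PySem.List.pyRange 1 (PySem.Str.len w + 1) 1).foldl
      (fun d i =>
        let p := PySem.List.slice w.toList none (some i)
        d.insert p (d.getD p 0 + 1)) cnt) PySem.Dict.empty

-- 'd = 0; for i in range(1, len(w)+1): d = i; if cnt[w[:i]] == 1: break' — the final d.
-- cnt[w[:i]] never raises KeyError (the key was inserted while processing w), so getD is exact.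
-- structural recursion on rem = len(w) - i + 1, the number of loop iterations left
def altCost (cnt : PySem.Dict (List Char) Int) (w : String) (i : Nat) : Nat → Int
  | 0 => 0
  | rem + 1 =>
    if cnt.getD (PySem.List.slice w.toList none (some (i : Int))) 0 == 1 then (i : Int)
    else if 0 < rem then altCost cnt w (i + 1) rem else (i : Int)

def solution_alt (words : List String) : Int :=
  let cnt := altCount words
  words.foldl (fun total w => total + altCost cnt w 1 w.toList.length) 0

-- ===== PRECONDITION & SPEC =====
-- Pre_ excludes exactly the inputs where Python A raises UnboundLocalError: a list of at least two
-- words containing the empty string (after sorting the first pair's inner loop never binds j).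
def Pre_solution (words : List String) : Prop := words.length ≤ 1 ∨ "" ∉ words
instance (words : List String) : Decidable (Pre_solution words) := by unfold Pre_solution; infer_instance
def pvWitness_solution : List String := ["ab", "a"]

-- On a single-element list with a nonempty word A returns 0 (its pairwise loop never runs), while B
-- returns 1, the intended cost of typing one character before autocomplete finishes the unique word.
def D_solution (words : List String) : Prop := words.length = 1 ∧ words ≠ [""]
instance (words : List String) : Decidable (D_solution words) := by unfold D_solution; infer_instance
def Spec_solution (words : List String) (out : Int) : Prop := ¬ D_solution words → out = solution_alt words
instance (words : List String) (out : Int) : Decidable (Spec_solution words out) := by unfold Spec_solution; infer_instance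
def pvDiffWitness_solution : List String := ["a"]
def pvDiffWitnessOut_solution : Int × Int := (0, 1)

-- ===== CLAIM (what is proved, stated in full; the proofs are below) =====
def Claim_unchanged_solution : Prop := ∀ (words : List String), Dom_solution words → Pre_solution words → Spec_solution words (solution words)
def Claim_changed_solution : Prop := Dom_solution (pvDiffWitness_solution) ∧ Pre_solution (pvDiffWitness_solution) ∧ D_solution (pvDiffWitness_solution) ∧ solution (pvDiffWitness_solution) = pvDiffWitnessOut_solution.1 ∧ solution_alt (pvDiffWitness_solution) = pvDiffWitnessOut_solution.2 ∧ pvDiffWitnessOut_solution.1 ≠ pvDiffWitnessOut_solution.2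
def Claim_exact_solution : Prop := ∀ (words : List String), Dom_solution words → Pre_solution words → D_solution words → solution words ≠ solution_alt words

-- ===== LEMMAS AND PROOFS =====

set_option maxHeartbeats 2000000

/-! ### Longest common prefix -/

def lcp : List Char → List Char → Nat
  | x :: xs, y :: ys => if x = y then lcp xs ys + 1 else 0
  | _, _ => 0

lemma lcp_nil_left (y : List Char) : lcp [] y = 0 := by cases y <;> rfl

lemma lcp_le_left : ∀ x y : List Char, lcp x y ≤ x.length
  | [], y => by simp [lcp_nil_left]
  | _ :: _, [] => by simp [lcp]
  | x :: xs, y :: ys => by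
    by_cases h : x = y <;> simp [lcp, h]
    exact lcp_le_left xs ys

lemma lcp_le_right : ∀ x y : List Char, lcp x y ≤ y.length
  | [], y => by simp [lcp_nil_left]
  | _ :: _, [] => by simp [lcp]
  | x :: xs, y :: ys => by
    by_cases h : x = y <;> simp [lcp, h]
    exact lcp_le_right xs ys

lemma lcp_comm : ∀ x y : List Char, lcp x y = lcp y x
  | [], y => by simp [lcp_nil_left]; cases y <;> rfl
  | _ :: _, [] => by rfl
  | x :: xs, y :: ys => by
    by_cases h : x = y
    · subst h; simp [lcp, lcp_comm xs ys]
    · have h' : ¬ y = x := fun hh => h hh.symm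
      simp [lcp, h, h']

lemma lcp_self : ∀ x : List Char, lcp x x = x.length
  | [] => rfl
  | x :: xs => by simp [lcp, lcp_self xs]

lemma le_lcp_iff : ∀ (x y : List Char) (i : Nat),
    i ≤ lcp x y ↔ i ≤ x.length ∧ i ≤ y.length ∧ x.take i = y.take i
  | x, y, 0 => by simp
  | [], y, i + 1 => by simp [lcp_nil_left]
  | _ :: _, [], i + 1 => by simp [lcp]
  | x :: xs, y :: ys, i + 1 => by
    by_cases h : x = y
    · subst h
      have hl : lcp (x :: xs) (x :: ys) = lcp xs ys + 1 := by simp [lcp]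
      rw [hl]
      simp only [List.take_succ_cons, List.length_cons]
      rw [Nat.succ_le_succ_iff, le_lcp_iff xs ys i]
      constructor
      · rintro ⟨h1, h2, h3⟩; exact ⟨by omega, by omega, by rw [h3]⟩
      · rintro ⟨h1, h2, h3⟩
        exact ⟨by omega, by omega, by simpa using h3⟩
    · simp only [lcp, if_neg h, List.take_succ_cons, List.length_cons]
      constructor
      · omega
      · rintro ⟨-, -, h3⟩; exact absurd (List.cons.inj h3).1 h

lemma lcp_eq_of_mismatch {x y : List Char} {j : Nat} (ht : x.take j = y.take j)
    (hx : j < x.length) (hy : j < y.length) (hne : x[j]? ≠ y[j]?) : lcp x y = j := by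
  have h1 : j ≤ lcp x y := (le_lcp_iff x y j).mpr ⟨by omega, by omega, ht⟩
  have h2 : ¬ (j + 1 ≤ lcp x y) := by
    intro hc
    obtain ⟨-, -, h3⟩ := (le_lcp_iff x y (j + 1)).mp hc
    apply hne
    have := congrArg (fun l => l[j]?) h3
    simpa [List.getElem?_take, hx, hy] using this
  omega

/-! ### The per-word cost: length capped max-lcp over the other words -/

def mlcp (w : String) (l : List String) : Nat :=
  (l.map (fun v => lcp w.toList v.toList)).foldr max 0

lemma le_mlcp {w : String} {l : List String} {v : String} (h : v ∈ l) :
    lcp w.toList v.toList ≤ mlcp w l := by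
  induction l with
  | nil => cases h
  | cons a t ih =>
    rcases List.mem_cons.mp h with rfl | h'
    · exact le_max_left _ _
    · exact le_trans (ih h') (le_max_right _ _)

lemma mlcp_le {w : String} {l : List String} {m : Nat}
    (h : ∀ v ∈ l, lcp w.toList v.toList ≤ m) : mlcp w l ≤ m := by
  induction l with
  | nil => exact Nat.zero_le m
  | cons a t ih =>
    exact max_le (h a List.mem_cons_self) (ih fun v hv => h v (List.mem_cons_of_mem a hv))

lemma mlcp_congr_perm {w : String} {l l' : List String} (h : l.Perm l') :
    mlcp w l = mlcp w l' := by
  apply Nat.le_antisymm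
  · exact mlcp_le fun v hv => le_mlcp (h.mem_iff.mp hv)
  · exact mlcp_le fun v hv => le_mlcp (h.mem_iff.mpr hv)

def gNat (w : String) (l : List String) : Nat :=
  min w.toList.length (mlcp w l + 1)

lemma gNat_congr_perm {w : String} {l l' : List String} (h : l.Perm l') :
    gNat w l = gNat w l' := by unfold gNat; rw [mlcp_congr_perm h]

def FNat (ws : List String) : Nat :=
  (ws.map (fun w => gNat w (ws.erase w))).sum

/-! ### B-side: the dict counts prefixes -/

def prefs (v : List Char) : List (List Char) :=
  (List.range v.length).map (fun k => v.take (k + 1))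

lemma nodup_prefs (v : List Char) : (prefs v).Nodup := by
  refine List.Nodup.map_on ?_ (List.nodup_range)
  intro a ha b hb hab
  have := congrArg List.length hab
  simp only [List.length_take] at this
  rw [List.mem_range] at ha hb
  omega

lemma mem_prefs {p v : List Char} :
    p ∈ prefs v ↔ 1 ≤ p.length ∧ p.length ≤ v.length ∧ v.take p.length = p := by
  unfold prefs
  simp only [List.mem_map, List.mem_range]
  constructor
  · rintro ⟨k, hk, rfl⟩
    have hl : (v.take (k + 1)).length = k + 1 := by rw [List.length_take]; omega
    exact ⟨by omega, by omega, by rw [hl]⟩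
  · rintro ⟨h1, h2, h3⟩
    exact ⟨p.length - 1, by omega, by rw [show p.length - 1 + 1 = p.length by omega, h3]⟩

lemma count_prefs (p v : List Char) :
    (prefs v).count p =
      if 1 ≤ p.length ∧ p.length ≤ v.length ∧ v.take p.length = p then 1 else 0 := by
  split_ifs with h
  · exact List.count_eq_one_of_mem (nodup_prefs v) (mem_prefs.mpr h)
  · exact List.count_eq_zero_of_not_mem (fun hc => h (mem_prefs.mp hc))

lemma take_count_prefs {w v : List Char} {i : Nat} (h1 : 1 ≤ i) (h2 : i ≤ w.length) :
    (prefs v).count (w.take i) = if i ≤ lcp w v then 1 else 0 := by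
  have hlen : (w.take i).length = i := by simp; omega
  rw [count_prefs, hlen]
  congr 1
  simp only [eq_iff_iff]
  rw [le_lcp_iff]
  constructor
  · rintro ⟨-, hv, ht⟩; exact ⟨h2, hv, ht.symm⟩
  · rintro ⟨-, hv, ht⟩; exact ⟨h1, hv, ht.symm⟩

/-! ### B-side: the dict built by the port is the prefix counter -/

lemma foldl_foldl_eq_foldl_flatMap {α β γ : Type} (f : γ → β → γ) (g : α → List β) :
    ∀ (l : List α) (init : γ),
      l.foldl (fun acc x => (g x).foldl f acc) init = (l.flatMap g).foldl f init
  | [], _ => rfl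
  | x :: t, init => by
    simp only [List.foldl_cons, List.flatMap_cons, List.foldl_append]
    exact foldl_foldl_eq_foldl_flatMap f g t _

lemma map_pyRange_slice (w : String) :
    (PySem.List.pyRange 1 (PySem.Str.len w + 1) 1).map
        (fun i => PySem.List.slice w.toList none (some i)) = prefs w.toList := by
  have hlen : PySem.Str.len w = (w.toList.length : Int) := by
    rw [PySem.Str.len_eq, String.length_toList]
  rw [hlen, show ((w.toList.length : Int) + 1) = ((w.toList.length + 1 : Nat) : Int) by push_cast; ring]
  rw [PySem.List.pyRange_one]
  simp only [List.map_map]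
  unfold prefs
  rw [show ((w.toList.length + 1 : Nat) : Int) - 1 = ((w.toList.length : Nat) : Int) by push_cast; ring]
  rw [Int.toNat_natCast]
  apply List.map_congr_left
  intro k _
  simp only [Function.comp_apply]
  rw [show (1 : Int) + k = ((k + 1 : Nat) : Int) by push_cast; ring]
  rw [PySem.List.slice_to_natCast]

lemma altCount_eq_counter (words : List String) :
    altCount words = PySem.Dict.counter (words.flatMap (fun w => prefs w.toList)) := by
  unfold altCount
  rw [← PySem.Dict.foldl_insert_getD_add_one_eq_counter]
  rw [← foldl_foldl_eq_foldl_flatMap]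
  apply PySem.List.foldl_congr_mem
  intro acc w _
  rw [← map_pyRange_slice w, List.foldl_map]

def cOther (w : String) (l : List String) (i : Nat) : Nat :=
  l.countP (fun v => decide (i ≤ lcp w.toList v.toList))

lemma count_flatMap_prefs (words : List String) (p : List Char) :
    (words.flatMap (fun w => prefs w.toList)).count p =
      (words.map (fun v => (prefs v.toList).count p)).sum := by
  induction words with
  | nil => rfl
  | cons a t ih => simp [List.flatMap_cons, List.count_append, ih]

lemma getD_altCount {words : List String} {w : String} {i : Nat}
    (hw : w ∈ words) (h1 : 1 ≤ i) (h2 : i ≤ w.toList.length) :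
    (altCount words).getD (w.toList.take i) 0 = 1 + (cOther w (words.erase w) i : Int) := by
  rw [altCount_eq_counter, PySem.Dict.getD_counter, count_flatMap_prefs]
  have hperm : words.Perm (w :: words.erase w) := List.perm_cons_erase hw
  rw [(hperm.map (fun v => (prefs v.toList).count (w.toList.take i))).sum_eq]
  simp only [List.map_cons, List.sum_cons]
  rw [take_count_prefs h1 h2, if_pos (by rw [lcp_self]; exact h2)]
  have hsum : ∀ l : List String,
      (l.map (fun v => (prefs v.toList).count (w.toList.take i))).sum = cOther w l i := by
    intro l
    induction l with
    | nil => rfl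
    | cons a t ih =>
      simp only [List.map_cons, List.sum_cons, ih]
      unfold cOther
      rw [List.countP_cons, take_count_prefs h1 h2]
      by_cases hc : i ≤ lcp w.toList a.toList
      · rw [if_pos hc, if_pos (by simpa using hc)]; omega
      · rw [if_neg hc, if_neg (by simpa using hc)]; omega
  rw [hsum]
  push_cast
  ring

lemma cOther_eq_zero_iff {w : String} {l : List String} {i : Nat} (h1 : 1 ≤ i) :
    cOther w l i = 0 ↔ mlcp w l < i := by
  unfold cOther
  rw [List.countP_eq_zero]
  constructor
  · intro h
    induction l with
    | nil => simpa [mlcp] using h1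
    | cons a t ih =>
      have ha := h a List.mem_cons_self
      have hrest := ih (fun v hv => h v (List.mem_cons_of_mem a hv))
      have hm : mlcp w (a :: t) = max (lcp w.toList a.toList) (mlcp w t) := rfl
      rw [hm]
      simp only [decide_eq_true_eq] at ha
      omega
  · intro h v hv
    simp only [decide_eq_true_eq]
    intro hc
    exact absurd (le_trans hc (le_mlcp hv)) (by omega)

/-! ### B-side: altCost returns the capped cost -/

lemma altCost_go {words : List String} {w : String} {l : List String}
    (hkey : ∀ k, 1 ≤ k → k ≤ w.toList.length →
      (altCount words).getD (w.toList.take k) 0 = 1 + (cOther w l k : Int)) :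
    ∀ (rem i : Nat), 1 ≤ i → i + rem = w.toList.length →
      altCost (altCount words) w i (rem + 1) =
        ((min w.toList.length (max i (mlcp w l + 1)) : Nat) : Int) := by
  intro rem
  induction rem with
  | zero =>
    intro i h1 h2
    rw [altCost]
    have hs : PySem.List.slice w.toList none (some (i : Int)) = w.toList.take i :=
      PySem.List.slice_to_natCast w.toList i
    rw [hs, hkey i h1 (by omega)]
    by_cases hc : cOther w l i = 0
    · rw [if_pos (by simp [hc])]
      have := (cOther_eq_zero_iff h1).mp hc
      congr 1
      omega
    · rw [if_neg (by simpa using fun hh => hc (by omega)), if_neg (by omega)]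
      have : ¬ (mlcp w l < i) := fun hh => hc ((cOther_eq_zero_iff h1).mpr hh)
      congr 1
      omega
  | succ rem ih =>
    intro i h1 h2
    rw [altCost]
    have hs : PySem.List.slice w.toList none (some (i : Int)) = w.toList.take i :=
      PySem.List.slice_to_natCast w.toList i
    rw [hs, hkey i h1 (by omega)]
    by_cases hc : cOther w l i = 0
    · rw [if_pos (by simp [hc])]
      have := (cOther_eq_zero_iff h1).mp hc
      congr 1
      omega
    · rw [if_neg (by simpa using fun hh => hc (by omega)), if_pos (by omega)]
      rw [ih (i + 1) (by omega) (by omega)]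
      have : ¬ (mlcp w l < i) := fun hh => hc ((cOther_eq_zero_iff h1).mpr hh)
      congr 1
      omega

lemma altCost_spec {words : List String} {w : String} (hw : w ∈ words) :
    altCost (altCount words) w 1 w.toList.length =
      ((gNat w (words.erase w) : Nat) : Int) := by
  rcases hL : w.toList.length with _ | L
  · rw [altCost]
    unfold gNat
    rw [hL]
    simp
  · have := altCost_go (words := words) (w := w) (l := words.erase w)
      (fun k hk1 hk2 => getD_altCount hw hk1 hk2) L 1 (by omega) (by omega)
    rw [this]
    unfold gNat
    rw [show max 1 (mlcp w (words.erase w) + 1) = mlcp w (words.erase w) + 1 by omega]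

lemma solution_alt_eq (words : List String) : solution_alt words = ((FNat words : Nat) : Int) := by
  unfold solution_alt FNat
  have haux : ∀ (l : List String) (init : Int),
      (∀ w ∈ l, altCost (altCount words) w 1 w.toList.length =
        ((gNat w (words.erase w) : Nat) : Int)) →
      l.foldl (fun total w => total + altCost (altCount words) w 1 w.toList.length) init =
        init + ((l.map (fun w => gNat w (words.erase w))).sum : Int) := by
    intro l
    induction l with
    | nil => intro init _; simp
    | cons a t ih =>
      intro init h
      simp only [List.foldl_cons, List.map_cons, List.sum_cons]
      rw [ih _ (fun w hw => h w (List.mem_cons_of_mem a hw)), h a List.mem_cons_self]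
      push_cast
      ring
  rw [haux words 0 (fun w hw => altCost_spec hw)]
  push_cast
  ring


/-! ### A-side: the inner loop computes lcp - 1 -/

lemma solInner_go (t1 t2 : String) (m : Nat) (hm : m = min t1.toList.length t2.toList.length) :
    ∀ (d j : Nat), j + d = m → t1.toList.take j = t2.toList.take j →
      solInner t1 t2 m j = (lcp t1.toList t2.toList : Int) - 1
  | 0, j, hj, ht => by
    rw [solInner.eq_def, dif_neg (by omega)]
    have h1 : lcp t1.toList t2.toList ≤ m :=
      hm ▸ le_min (lcp_le_left _ _) (lcp_le_right _ _)
    have h2 : m ≤ lcp t1.toList t2.toList :=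
      (le_lcp_iff _ _ m).mpr ⟨by omega, by omega, by rw [show m = j by omega]; exact ht⟩
    rw [show lcp t1.toList t2.toList = m by omega]
  | d + 1, j, hj, ht => by
    rw [solInner.eq_def, dif_pos (by omega : j < m)]
    have hle1 : m ≤ t1.toList.length := by rw [hm]; exact min_le_left _ _
    have hle2 : m ≤ t2.toList.length := by rw [hm]; exact min_le_right _ _
    have hj1 : j < t1.toList.length := by omega
    have hj2 : j < t2.toList.length := by omega
    rw [PySem.Str.pyGet?_natCast, PySem.Str.pyGet?_natCast]
    by_cases hc : t1.toList[j]? = t2.toList[j]?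
    · rw [if_neg (by simpa using hc)]
      have ht' : t1.toList.take (j + 1) = t2.toList.take (j + 1) := by
        rw [List.take_add_one, List.take_add_one, ht, hc]
      exact solInner_go t1 t2 m hm d (j + 1) (by omega) ht'
    · rw [if_pos hc]
      rw [lcp_eq_of_mismatch ht hj1 hj2 hc]

lemma solInner_spec (t1 t2 : String) :
    solInner t1 t2 (min (PySem.Str.len t1) (PySem.Str.len t2)).toNat 0 =
      (lcp t1.toList t2.toList : Int) - 1 := by
  have hmin : (min (PySem.Str.len t1) (PySem.Str.len t2)).toNat =
      min t1.toList.length t2.toList.length := by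
    rw [PySem.Str.len_eq, PySem.Str.len_eq, ← Nat.cast_min, Int.toNat_natCast]
  rw [hmin]
  exact solInner_go t1 t2 _ rfl (min t1.toList.length t2.toList.length) 0 (by omega) (by simp)

/-! ### A-side: the answer array after k iterations of the outer loop -/

def sget (s : List String) (j : Nat) : String := s.getD j ""
def lenN (s : List String) (j : Nat) : Nat := (sget s j).toList.length
def lcN (s : List String) (j : Nat) : Nat := lcp (sget s j).toList (sget s (j + 1)).toList

def rmaxN (s : List String) (n j : Nat) : Nat :=
  max (if j = 0 then 0 else lcN s (j - 1)) (if j + 2 ≤ n then lcN s j else 0)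

def RN (s : List String) (n j : Nat) : Nat := min (lenN s j) (rmaxN s n j + 1)

def valA (s : List String) (n k j : Nat) : Int :=
  if j < k then (RN s n j : Int)
  else if j = k ∧ 0 < k then ((min (lenN s k) (lcN s (k - 1) + 1) : Nat) : Int)
  else 0

lemma mapRange_getD (f : Nat → Int) (n k : Nat) (hk : k < n) (d : Int) :
    ((List.range n).map f).getD k d = f k := by
  rw [List.getD_eq_getElem?_getD]
  simp [hk]

lemma mapRange_set (f : Nat → Int) (n k : Nat) (v : Int) :
    ((List.range n).map f).set k v =
      (List.range n).map (fun j => if j = k then v else f j) := by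
  apply List.ext_getElem (by simp)
  intro i h1 h2
  simp only [List.getElem_set, List.getElem_map, List.getElem_range]
  by_cases hik : k = i
  · subst hik; simp
  · rw [if_neg hik, if_neg (fun hh => hik hh.symm)]

lemma solStep_inv (s : List String) (n : Nat) (hn : s.length = n) (k : Nat) (hk : k + 1 < n) :
    solStep s ((List.range n).map (valA s n k)) (k : Int) =
      (List.range n).map (valA s n (k + 1)) := by
  have hkn : k < n := by omega
  have hk1n : k + 1 < n := hk
  have hcast1 : ((k : Int) + 1) = ((k + 1 : Nat) : Int) := by push_cast; ring
  unfold solStep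
  dsimp only
  rw [hcast1]
  simp only [PySem.List.pyGetD_natCast, PySem.List.pySetD_natCast]
  rw [show s.getD k "" = sget s k from rfl, show s.getD (k+1) "" = sget s (k+1) from rfl]
  rw [solInner_spec]
  rw [show lcp (sget s k).toList (sget s (k+1)).toList = lcN s k from rfl]
  rw [PySem.Str.len_eq, PySem.Str.len_eq]
  rw [show (sget s k).toList.length = lenN s k from rfl,
      show (sget s (k+1)).toList.length = lenN s (k+1) from rfl]
  rw [mapRange_getD _ _ _ hkn, mapRange_set]
  rw [mapRange_getD _ _ _ hk1n, mapRange_set]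
  rw [if_neg (by omega : ¬ (k + 1 = k))]
  apply List.map_congr_left
  intro j hj
  rw [List.mem_range] at hj
  by_cases hj1 : j = k + 1
  · rw [if_pos hj1]
    subst hj1
    unfold valA
    rw [if_neg (by omega : ¬ (k + 1 < k)), if_neg (by omega : ¬ (k + 1 = k ∧ 0 < k)),
        if_neg (by omega : ¬ (k + 1 < k + 1)),
        if_pos (⟨rfl, by omega⟩ : k + 1 = k + 1 ∧ 0 < k + 1), Nat.add_sub_cancel]
    push_cast
    omega
  · rw [if_neg hj1]
    by_cases hj2 : j = k
    · rw [if_pos hj2]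
      subst hj2
      unfold valA
      rw [if_neg (by omega : ¬ (j < j)), if_pos (by omega : j < j + 1)]
      unfold RN rmaxN
      rw [if_pos (by omega : j + 2 ≤ n)]
      by_cases h0 : 0 < j
      · rw [if_pos (⟨rfl, h0⟩ : j = j ∧ 0 < j), if_neg (by omega : ¬ (j = 0))]
        push_cast
        omega
      · rw [if_neg (by omega : ¬ (j = j ∧ 0 < j)), if_pos (by omega : j = 0)]
        push_cast
        omega
    · rw [if_neg hj2]
      unfold valA
      by_cases hlt : j < k
      · rw [if_pos hlt, if_pos (by omega : j < k + 1)]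
      · rw [if_neg hlt, if_neg (by omega : ¬ (j < k + 1)),
            if_neg (by omega : ¬ (j = k ∧ 0 < k)), if_neg (by omega : ¬ (j = k + 1 ∧ 0 < k + 1))]

lemma foldl_solStep (s : List String) (n : Nat) (hn : s.length = n) (hn2 : 2 ≤ n) :
    ∀ k, k ≤ n - 1 →
      (PySem.List.pyRange 0 (k : Int) 1).foldl (solStep s) ((List.range n).map (fun _ => (0 : Int))) =
        (List.range n).map (valA s n k)
  | 0, _ => by
    rw [show ((0 : Nat) : Int) = 0 from rfl, PySem.List.pyRange_one_eq_nil le_rfl]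
    simp only [List.foldl_nil]
    apply List.map_congr_left
    intro j _
    unfold valA
    rw [if_neg (by omega), if_neg (by omega)]
  | k + 1, hk => by
    have hcast : ((k + 1 : Nat) : Int) = (k : Int) + 1 := by push_cast; ring
    rw [hcast, PySem.List.pyRange_one_succ_right (by positivity), List.foldl_append]
    rw [foldl_solStep s n hn hn2 k (by omega)]
    simp only [List.foldl_cons, List.foldl_nil]
    exact solStep_inv s n hn k (by omega)

lemma sum_cast_map (f : Nat → Nat) (l : List Nat) :
    (l.map (fun j => ((f j : Nat) : Int))).sum = (((l.map f).sum : Nat) : Int) := by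
  rw [Nat.cast_list_sum, List.map_map]
  rfl

lemma solution_eq_sum (words : List String) (hn2 : 2 ≤ words.length) :
    solution words =
      (((List.range words.length).map
          (RN (PySem.List.sorted words (fun x => x) false) words.length)).sum : Int) := by
  unfold solution
  dsimp only
  set s := PySem.List.sorted words (fun x => x) false with hs
  set n := words.length with hnw
  have hlen : s.length = n := PySem.List.length_sorted words _ _
  have hrep : List.replicate n (0 : Int) = (List.range n).map (fun _ => (0 : Int)) := by
    rw [List.map_const', List.length_range]
  have hpy : PySem.List.len s - 1 = ((n - 1 : Nat) : Int) := by
    rw [PySem.List.len_eq, hlen]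
    omega
  rw [hrep, hpy, foldl_solStep s n hlen hn2 (n - 1) le_rfl]
  have hmc : (List.range n).map (valA s n (n - 1)) =
      (List.range n).map (fun j => ((RN s n j : Nat) : Int)) := by
    apply List.map_congr_left
    intro j hj
    rw [List.mem_range] at hj
    unfold valA
    by_cases hlt : j < n - 1
    · rw [if_pos hlt]
    · have hje : j = n - 1 := by omega
      subst hje
      rw [if_neg (by omega), if_pos ⟨rfl, by omega⟩]
      unfold RN rmaxN
      rw [if_neg (by omega : ¬ (n - 1 + 2 ≤ n)), if_neg (by omega : ¬ (n - 1 = 0))]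
      congr 2
      omega
  rw [hmc, sum_cast_map]

/-! ### Sorted order: lcp with any other word is below a neighbour's -/

lemma not_cons_le_nil (x : Char) (a : List Char) : ¬ ((x :: a : List Char) ≤ []) := by
  rw [le_iff_lt_or_eq]
  rintro (h | h)
  · cases (show List.Lex (· < ·) (x :: a) [] from h)
  · simp at h

lemma cons_le_elim {x y : Char} {a b : List Char} (h : (x :: a : List Char) ≤ (y :: b)) :
    x < y ∨ (x = y ∧ a ≤ b) := by
  rw [le_iff_lt_or_eq] at h
  rcases h with h | h
  · cases (show List.Lex (· < ·) (x :: a) (y :: b) from h) with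
    | cons h' => exact Or.inr ⟨rfl, le_of_lt h'⟩
    | rel h' => exact Or.inl h'
  · obtain ⟨rfl, rfl⟩ := List.cons.inj h
    exact Or.inr ⟨rfl, le_rfl⟩

lemma lcp_squeeze : ∀ (a b c : List Char), a ≤ b → b ≤ c →
    lcp a c ≤ lcp a b ∧ lcp a c ≤ lcp b c
  | [], b, c, _, _ => by simp [lcp_nil_left]
  | x :: a', b, [], h1, h2 => by
    have : lcp (x :: a') ([] : List Char) = 0 := rfl
    simp [this]
  | x :: a', b, y :: c', h1, h2 => by
    by_cases hxy : x = y
    · subst hxy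
      cases b with
      | nil => exact absurd h1 (not_cons_le_nil x a')
      | cons z b' =>
        rcases cons_le_elim h1 with hlt1 | ⟨he1, hab⟩
        · rcases cons_le_elim h2 with hlt2 | ⟨he2, hbc⟩
          · exact absurd (lt_trans hlt1 hlt2) (lt_irrefl x)
          · exact absurd (he2 ▸ hlt1) (lt_irrefl x)
        · subst he1
          rcases cons_le_elim h2 with hlt2 | ⟨-, hbc⟩
          · exact absurd hlt2 (lt_irrefl x)
          · have ih := lcp_squeeze a' b' c' hab hbc
            constructor
            · simpa [lcp] using ih.1
            · simpa [lcp] using ih.2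
    · have h0 : lcp (x :: a') (y :: c') = 0 := by simp [lcp, hxy]
      simp [h0]

lemma le_of_le_strings {a b : String} (h : a ≤ b) : a.toList ≤ b.toList :=
  String.le_iff_toList_le.mp h

lemma getElem_le_of_sorted {s : List String} (hpw : s.Pairwise (· ≤ ·)) {p q : Nat}
    (hpq : p ≤ q) (hq : q < s.length) : s[p]'(lt_of_le_of_lt hpq hq) ≤ s[q] := by
  rcases Nat.lt_or_ge p q with hlt | hge
  · exact (List.pairwise_iff_getElem.mp hpw) p q _ hq hlt
  · have : p = q := by omega
    subst this
    exact le_rfl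

lemma sget_eq_getElem {s : List String} {j : Nat} (hj : j < s.length) :
    sget s j = s[j] := List.getD_eq_getElem s "" hj

lemma mem_eraseIdx_of_ne {s : List String} {q j : Nat} (hq : q < s.length) (hne : q ≠ j) :
    s[q] ∈ s.eraseIdx j := by
  rw [List.eraseIdx_eq_take_drop_succ]
  rcases Nat.lt_or_ge q j with hlt | hge
  · apply List.mem_append_left
    have hq' : q < (s.take j).length := by
      rw [List.length_take]
      omega
    have : (s.take j)[q] = s[q] := List.getElem_take
    exact this ▸ List.getElem_mem hq'
  · apply List.mem_append_right
    have hgt : j + 1 ≤ q := by omega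
    have hq' : q - (j + 1) < (s.drop (j + 1)).length := by
      rw [List.length_drop]
      omega
    have : (s.drop (j + 1))[q - (j + 1)] = s[q] := by
      rw [List.getElem_drop]
      congr 1
      omega
    exact this ▸ List.getElem_mem hq'

lemma exists_getElem_of_mem_eraseIdx {s : List String} {j : Nat} {v : String}
    (hv : v ∈ s.eraseIdx j) : ∃ q, ∃ hq : q < s.length, q ≠ j ∧ s[q] = v := by
  rw [List.eraseIdx_eq_take_drop_succ] at hv
  rcases List.mem_append.mp hv with h | h
  · obtain ⟨q, hq, he⟩ := List.getElem_of_mem h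
    have hqj : q < j := by
      have := hq
      rw [List.length_take] at this
      omega
    have hql : q < s.length := by
      have := hq
      rw [List.length_take] at this
      omega
    refine ⟨q, hql, by omega, ?_⟩
    rw [← he, List.getElem_take]
  · obtain ⟨q, hq, he⟩ := List.getElem_of_mem h
    have hql : j + 1 + q < s.length := by
      have := hq
      rw [List.length_drop] at this
      omega
    refine ⟨j + 1 + q, hql, by omega, ?_⟩
    rw [← he, List.getElem_drop]

lemma rmax_eq_mlcp {s : List String} {n : Nat} (hn : s.length = n)
    (hpw : s.Pairwise (· ≤ ·)) (hn2 : 2 ≤ n) {j : Nat} (hj : j < n) :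
    mlcp (sget s j) (s.eraseIdx j) = rmaxN s n j := by
  have hjs : j < s.length := by omega
  apply Nat.le_antisymm
  · apply mlcp_le
    intro v hv
    obtain ⟨q, hq, hqj, rfl⟩ := exists_getElem_of_mem_eraseIdx hv
    rw [sget_eq_getElem hjs]
    rcases Nat.lt_or_ge q j with hlt | hge
    · -- q < j: squeeze through the left neighbour j-1
      have hj1 : j - 1 < s.length := by omega
      have h1 : s[q].toList ≤ (s[j-1]'hj1).toList :=
        le_of_le_strings (getElem_le_of_sorted hpw (by omega) hj1)
      have h2 : (s[j-1]'hj1).toList ≤ s[j].toList :=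
        le_of_le_strings (getElem_le_of_sorted hpw (by omega) hjs)
      have hsq := (lcp_squeeze _ _ _ h1 h2).2
      have hln : lcN s (j - 1) = lcp (s[j-1]'hj1).toList s[j].toList := by
        unfold lcN
        rw [sget_eq_getElem hj1, show j - 1 + 1 = j by omega, sget_eq_getElem hjs]
      rw [lcp_comm]
      unfold rmaxN
      rw [if_neg (by omega : ¬ (j = 0))]
      calc lcp s[q].toList s[j].toList ≤ lcp (s[j-1]'hj1).toList s[j].toList := hsq
        _ = lcN s (j - 1) := hln.symm
        _ ≤ _ := le_max_left _ _
    · -- j < q: squeeze through the right neighbour j+1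
      have hq1 : j + 1 < s.length := by omega
      have h1 : s[j].toList ≤ (s[j+1]'hq1).toList :=
        le_of_le_strings (getElem_le_of_sorted hpw (by omega) hq1)
      have h2 : (s[j+1]'hq1).toList ≤ s[q].toList :=
        le_of_le_strings (getElem_le_of_sorted hpw (by omega) hq)
      have hsq := (lcp_squeeze _ _ _ h1 h2).1
      have hln : lcN s j = lcp s[j].toList (s[j+1]'hq1).toList := by
        unfold lcN
        rw [sget_eq_getElem hjs, sget_eq_getElem hq1]
      unfold rmaxN
      rw [if_pos (by omega : j + 2 ≤ n)]
      calc lcp s[j].toList s[q].toList ≤ lcp s[j].toList (s[j+1]'hq1).toList := hsq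
        _ = lcN s j := hln.symm
        _ ≤ _ := le_max_right _ _
  · unfold rmaxN
    apply max_le
    · by_cases h0 : j = 0
      · rw [if_pos h0]; exact Nat.zero_le _
      · rw [if_neg h0]
        have hj1 : j - 1 < s.length := by omega
        have hmem : (s[j-1]'hj1) ∈ s.eraseIdx j := mem_eraseIdx_of_ne hj1 (by omega)
        have := le_mlcp (w := sget s j) hmem
        have hln : lcN s (j - 1) = lcp (sget s j).toList (s[j-1]'hj1).toList := by
          unfold lcN
          rw [sget_eq_getElem hj1, show j - 1 + 1 = j by omega, sget_eq_getElem hjs, lcp_comm]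
        rw [hln]
        exact this
    · by_cases h2n : j + 2 ≤ n
      · rw [if_pos h2n]
        have hq1 : j + 1 < s.length := by omega
        have hmem : (s[j+1]'hq1) ∈ s.eraseIdx j := mem_eraseIdx_of_ne hq1 (by omega)
        have := le_mlcp (w := sget s j) hmem
        have hln : lcN s j = lcp (sget s j).toList (s[j+1]'hq1).toList := by
          unfold lcN
          rw [sget_eq_getElem hjs, sget_eq_getElem hq1]
        rw [hln]
        exact this
      · rw [if_neg h2n]; exact Nat.zero_le _

/-! ### Permutation: the sum of capped costs does not depend on the order -/

lemma FNat_congr_perm {l l' : List String} (h : l.Perm l') : FNat l = FNat l' := by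
  unfold FNat
  rw [(h.map (fun w => gNat w (l.erase w))).sum_eq]
  congr 1
  apply List.map_congr_left
  intro w _
  exact gNat_congr_perm (h.erase w)

lemma sum_RN_eq_FNat {s : List String} {n : Nat} (hn : s.length = n)
    (hpw : s.Pairwise (· ≤ ·)) (hn2 : 2 ≤ n) :
    ((List.range n).map (RN s n)).sum = FNat s := by
  unfold FNat
  congr 1
  apply List.ext_getElem (by simp [hn])
  intro i h1 h2
  simp only [List.getElem_map, List.getElem_range]
  have hi : i < n := by simpa using h1
  have his : i < s.length := by omega
  have hstep1 : RN s n i = gNat (sget s i) (s.eraseIdx i) := by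
    unfold RN gNat lenN
    rw [rmax_eq_mlcp hn hpw hn2 hi]
  have hstep2 : gNat (sget s i) (s.eraseIdx i) = gNat (sget s i) (s.erase s[i]) := by
    exact gNat_congr_perm ((List.erase_getElem his).symm)
  rw [hstep1, hstep2, sget_eq_getElem his]

/-! ### Putting the two sides together -/

lemma solution_eq_alt_of_two_le {words : List String} (hn2 : 2 ≤ words.length) :
    solution words = solution_alt words := by
  set s := PySem.List.sorted words (fun x => x) false with hs
  have hperm : s.Perm words := PySem.List.sorted_perm words _ _
  have hlen : s.length = words.length := PySem.List.length_sorted words _ _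
  have hpw : s.Pairwise (· ≤ ·) := by
    have := PySem.List.sorted_pairwise (xs := words) (key := fun x => x)
    simpa using this
  rw [solution_eq_sum words hn2, solution_alt_eq, ← hs]
  rw [sum_RN_eq_FNat hlen hpw hn2, FNat_congr_perm hperm]

-- ===== VERDICT (by name: the statement is the Claim_ definition above) =====
theorem solution_spec : Claim_unchanged_solution := by
  intro words _hdom _hpre hnD
  rcases hlen : words.length with _ | n
  · -- empty list
    have : words = [] := List.length_eq_zero_iff.mp hlen
    subst this
    decide
  · rcases n with _ | n
    · -- a single word: outside D_ it must be [""]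
      obtain ⟨w, rfl⟩ := List.length_eq_one_iff.mp hlen
      have hw : w = "" := by
        by_contra hne
        exact hnD ⟨rfl, by simpa using hne⟩
      subst hw
      decide
    · exact solution_eq_alt_of_two_le (by omega)
theorem solution_changed : Claim_changed_solution := by unfold Claim_changed_solution; decide
theorem solution_tight : Claim_exact_solution := by
  intro words _hdom _hpre hD
  obtain ⟨h1, hne⟩ := hD
  obtain ⟨w, rfl⟩ := List.length_eq_one_iff.mp h1
  have hw : w ≠ "" := fun hh => hne (by rw [hh])
  have hA : solution [w] = 0 := by
    unfold solution
    dsimp only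
    have hlen : (PySem.List.sorted [w] (fun x => x) false).length = 1 :=
      PySem.List.length_sorted _ _ _
    rw [PySem.List.len_eq, hlen]
    rw [show ((1 : Nat) : Int) - 1 = 0 by omega, PySem.List.pyRange_one_eq_nil le_rfl]
    simp
  have hB : solution_alt [w] = 1 := by
    rw [solution_alt_eq]
    unfold FNat
    simp only [List.map_cons, List.map_nil, List.sum_cons, List.sum_nil]
    rw [List.erase_cons_head]
    unfold gNat mlcp
    have hwl : 1 ≤ w.toList.length := by
      rcases Nat.eq_zero_or_pos w.toList.length with h0 | h0
      · exact absurd (by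
          have : w.toList = [] := List.length_eq_zero_iff.mp h0
          exact String.toList_eq_nil_iff.mp this) hw
      · omega
    simp only [List.map_nil, List.foldr_nil]
    omega
  rw [hA, hB]
  decide
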